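-- pv_equiv track=rewrite | github.com/jan25/code_sorted | codejam2018/1a_practise/a.py | Solution
-- ===== SOURCE A (Python) =====
-- def Solution(r, c, h, v, grid):
--     im = 'IMPOSSIBLE'
--     po = 'POSSIBLE'
--
--     count_chocs = 0
--     for row in grid:
--         for cell in row:
--             if cell == '@':
--                 count_chocs += 1
--
--     count_pieces = (h + 1) * (v + 1)
--     if count_chocs % count_pieces != 0:
--         return im
--     each = count_chocs // count_pieces
--     if each == 0: return po
--
--     ds = [[0] * c for _ in range(r)]
--     for ri in range(r):
--         c_sum = 0
--         for ci in range(c):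
--             if grid[ri][ci] == '@':
--                 c_sum += 1
--             ds[ri][ci] = c_sum + (ds[ri - 1][ci] if ri > 0 else 0)
--
--     def get_sum(a, b, x, y):
--         cell_sum = ds[x][y]
--         if a >= 0 and b >= 0: cell_sum += ds[a][b]
--         if a >= 0: cell_sum -= ds[a][y]
--         if b >= 0: cell_sum -= ds[x][b]
--         return cell_sum
--
--     # vertical splits
--     verticals = []
--     until_last_c_sum = 0
--     for ci in range(c):
--         if ds[r - 1][ci] - until_last_c_sum == each * (h + 1):
--             verticals.append(ci)
--             until_last_c_sum = ds[r - 1][ci]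
--
--     # horizontal splits
--     horizontals = []
--     until_last_r_sum = 0
--     for ri in range(r):
--         if ds[ri][c - 1] - until_last_r_sum == each * (v + 1):
--             horizontals.append(ri)
--             until_last_r_sum = ds[ri][c - 1]
--
--     if len(verticals) != v + 1 or len(horizontals) != h + 1:
--         return im
--
--     def check_split(a, b, x, y):
--         return get_sum(a - 1, b - 1, x, y) == each
--
--     last_h, last_v = 0, 0
--     for hor in horizontals:
--         last_v = 0
--         for ver in verticals:
--             if not check_split(last_h, last_v, hor, ver):
--                 return im
--             last_v = ver + 1
--         last_h = hor + 1
--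
--     return po
-- ===== SOURCE B (Python) =====
-- def Solution(r, c, h, v, grid):
--     im = 'IMPOSSIBLE'
--     po = 'POSSIBLE'
--
--     total = sum(row.count('@') for row in grid)
--     pieces = (h + 1) * (v + 1)
--     if total % pieces != 0:
--         return im
--     each = total // pieces
--     if each == 0:
--         return po
--
--     # 1D sums instead of a 2D prefix-sum table
--     row_sums = [row.count('@') for row in grid]
--     col_sums = [sum(1 for row in grid if row[ci] == '@') for ci in range(c)]
--
--     # greedy cut detection by accumulate-and-reset
--     verticals = []
--     acc = 0
--     for ci in range(c):
--         acc += col_sums[ci]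
--         if acc == each * (h + 1):
--             verticals.append(ci)
--             acc = 0
--     horizontals = []
--     acc = 0
--     for ri in range(r):
--         acc += row_sums[ri]
--         if acc == each * (v + 1):
--             horizontals.append(ri)
--             acc = 0
--
--     if len(verticals) != v + 1 or len(horizontals) != h + 1:
--         return im
--
--     # one pass over the cells: bucket every '@' into its region, then verify
--     counts = {}
--     for ri, row in enumerate(grid):
--         hr = sum(1 for x in horizontals if x < ri)
--         for ci, cell in enumerate(row):
--             if cell == '@':
--                 vr = sum(1 for x in verticals if x < ci)
--                 counts[(hr, vr)] = counts.get((hr, vr), 0) + 1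
--     if all(counts.get((k, l), 0) == each for k in range(h + 1) for l in range(v + 1)):
--         return po
--     return im
-- ===== Notes on version B (the rewrite author's own statement) =====
-- stated objective: alternative
-- what changed: B drops A's 2D prefix-sum table and O(1) rectangle queries entirely: it derives the greedy cut positions from directly-computed 1D row/column sums with an accumulate-and-reset scan, then buckets every '@' cell into its region via the sorted cut lists in one pass over the grid and finally checks that all (h+1)(v+1) region counts equal `each`.
-- outside the precondition, e.g. on Solution(1, 2, 0, 0, [['@', '.'], ['@']]): A returns 'IMPOSSIBLE', B raises IndexError; on Solution(2, 1, 0, 0, [['@'], ['@'], ['@']]): A returns 'IMPOSSIBLE', B returns 'IMPOSSIBLE'; on Solution(1, 1, -2, -2, [['@']]): A returns 'IMPOSSIBLE', B returns 'IMPOSSIBLE'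
import Mathlib
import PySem

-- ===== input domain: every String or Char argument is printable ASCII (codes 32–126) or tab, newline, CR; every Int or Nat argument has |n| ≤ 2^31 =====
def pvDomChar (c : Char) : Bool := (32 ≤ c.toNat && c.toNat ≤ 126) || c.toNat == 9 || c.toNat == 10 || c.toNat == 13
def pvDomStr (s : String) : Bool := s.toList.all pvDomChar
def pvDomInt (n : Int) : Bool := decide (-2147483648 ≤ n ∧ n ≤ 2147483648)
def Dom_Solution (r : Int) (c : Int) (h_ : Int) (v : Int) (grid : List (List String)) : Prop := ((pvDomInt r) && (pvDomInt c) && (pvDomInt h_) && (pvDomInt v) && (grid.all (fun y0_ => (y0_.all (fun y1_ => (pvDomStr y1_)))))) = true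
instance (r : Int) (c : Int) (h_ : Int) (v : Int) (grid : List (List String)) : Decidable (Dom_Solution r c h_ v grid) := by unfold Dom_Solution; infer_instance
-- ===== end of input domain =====

-- B replaces A's 2D prefix-sum table and per-region rectangle queries by 1D row/column sums
-- plus a single bucketing pass that counts each region directly (alternative algorithm, not faster).

-- ===== PORT A =====
-- get_sum(a, b, x, y) of A, reading the 2D prefix-sum table ds
def pvA_getSum (ds : List (List Int)) (a b x y : Int) : Int :=
  let s1 := PySem.List.pyGetD (PySem.List.pyGetD ds x []) y 0
  let s2 := if 0 ≤ a ∧ 0 ≤ b then s1 + PySem.List.pyGetD (PySem.List.pyGetD ds a []) b 0 else s1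
  let s3 := if 0 ≤ a then s2 - PySem.List.pyGetD (PySem.List.pyGetD ds a []) y 0 else s2
  if 0 ≤ b then s3 - PySem.List.pyGetD (PySem.List.pyGetD ds x []) b 0 else s3

-- A's inner 'for ver in verticals' loop with early 'return im' (false = returned im)
def pvA_inner (ds : List (List Int)) (each last_h hor : Int) : List Int → Int → Bool
  | [], _ => true
  | ver :: rest, last_v =>
    if pvA_getSum ds (last_h - 1) (last_v - 1) hor ver = each then
      pvA_inner ds each last_h hor rest (ver + 1)
    else false

-- A's outer 'for hor in horizontals' loop
def pvA_outer (ds : List (List Int)) (each : Int) (verticals : List Int) : List Int → Int → Bool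
  | [], _ => true
  | hor :: rest, last_h =>
    if pvA_inner ds each last_h hor verticals 0 then pvA_outer ds each verticals rest (hor + 1)
    else false

def Solution (r : Int) (c : Int) (h_ : Int) (v : Int) (grid : List (List String)) : String :=
  let im := "IMPOSSIBLE"
  let po := "POSSIBLE"
  let count_chocs := grid.foldl (fun acc row => row.foldl (fun a cell => if cell = "@" then a + 1 else a) acc) 0
  let count_pieces := (h_ + 1) * (v + 1)
  if PySem.Int.mod count_chocs count_pieces ≠ 0 then im
  else
    let each := PySem.Int.floordiv count_chocs count_pieces
    if each = 0 then po
    else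
      let ds0 : List (List Int) := (PySem.List.pyRange 0 r 1).map (fun _ => List.replicate c.toNat (0 : Int))
      let ds := (PySem.List.pyRange 0 r 1).foldl (fun ds ri =>
        ((PySem.List.pyRange 0 c 1).foldl (fun (st : Int × List (List Int)) ci =>
            let c_sum := if PySem.List.pyGetD (PySem.List.pyGetD grid ri []) ci "" = "@" then st.1 + 1 else st.1
            let value := c_sum + (if 0 < ri then PySem.List.pyGetD (PySem.List.pyGetD st.2 (ri - 1) []) ci 0 else 0)
            (c_sum, PySem.List.pySetD st.2 ri (PySem.List.pySetD (PySem.List.pyGetD st.2 ri []) ci value)))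
          (0, ds)).2) ds0
      let verticals := ((PySem.List.pyRange 0 c 1).foldl (fun (st : List Int × Int) ci =>
          if PySem.List.pyGetD (PySem.List.pyGetD ds (r - 1) []) ci 0 - st.2 = each * (h_ + 1) then
            (st.1 ++ [ci], PySem.List.pyGetD (PySem.List.pyGetD ds (r - 1) []) ci 0)
          else st) ([], 0)).1
      let horizontals := ((PySem.List.pyRange 0 r 1).foldl (fun (st : List Int × Int) ri =>
          if PySem.List.pyGetD (PySem.List.pyGetD ds ri []) (c - 1) 0 - st.2 = each * (v + 1) then
            (st.1 ++ [ri], PySem.List.pyGetD (PySem.List.pyGetD ds ri []) (c - 1) 0)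
          else st) ([], 0)).1
      if PySem.List.len verticals ≠ v + 1 ∨ PySem.List.len horizontals ≠ h_ + 1 then im
      else if pvA_outer ds each verticals horizontals 0 then po else im

-- ===== PORT B =====
def Solution_alt (r : Int) (c : Int) (h_ : Int) (v : Int) (grid : List (List String)) : String :=
  let im := "IMPOSSIBLE"
  let po := "POSSIBLE"
  let total := (grid.map (fun row => (PySem.List.count row "@" : Int))).sum
  let pieces := (h_ + 1) * (v + 1)
  if PySem.Int.mod total pieces ≠ 0 then im
  else
    let each := PySem.Int.floordiv total pieces
    if each = 0 then po
    else
      let row_sums := grid.map (fun row => (PySem.List.count row "@" : Int))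
      let col_sums := (PySem.List.pyRange 0 c 1).map (fun ci =>
        ((grid.filter (fun row => PySem.List.pyGetD row ci "" = "@")).length : Int))
      let verticals := ((PySem.List.pyRange 0 c 1).foldl (fun (st : List Int × Int) ci =>
          let acc := st.2 + PySem.List.pyGetD col_sums ci 0
          if acc = each * (h_ + 1) then (st.1 ++ [ci], 0) else (st.1, acc)) ([], 0)).1
      let horizontals := ((PySem.List.pyRange 0 r 1).foldl (fun (st : List Int × Int) ri =>
          let acc := st.2 + PySem.List.pyGetD row_sums ri 0
          if acc = each * (v + 1) then (st.1 ++ [ri], 0) else (st.1, acc)) ([], 0)).1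
      if PySem.List.len verticals ≠ v + 1 ∨ PySem.List.len horizontals ≠ h_ + 1 then im
      else
        let counts := (PySem.List.enumerate grid 0).foldl (fun (d : PySem.Dict (Int × Int) Int) p =>
            let hr := ((horizontals.filter (fun x => decide (x < p.1))).length : Int)
            (PySem.List.enumerate p.2 0).foldl (fun d q =>
              if q.2 = "@" then
                let vr := ((verticals.filter (fun x => decide (x < q.1))).length : Int)
                d.insert (hr, vr) (d.getD (hr, vr) 0 + 1)
              else d) d) PySem.Dict.empty
        if (PySem.List.pyRange 0 (h_ + 1) 1).all (fun k =>
             (PySem.List.pyRange 0 (v + 1) 1).all (fun l => decide (PySem.Dict.getD counts (k, l) 0 = each)))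
        then po else im

-- ===== PRECONDITION & SPEC =====
-- Pre_ excludes the inputs where A raises ((h+1)*(v+1) = 0 gives ZeroDivisionError, and in the
-- table-building branch a grid smaller than r × c gives IndexError) and, in that same branch
-- (chocolate count divisible with each > 0), grids not exactly matching the declared natural
-- r ≥ 1, c ≥ 1, h, v ≥ 0 domain, where A mixes a count over the whole grid with prefix sums
-- over the declared r × c subgrid and B's own indexing can raise on rows shorter than c.
def Pre_Solution (r : Int) (c : Int) (h_ : Int) (v : Int) (grid : List (List String)) : Prop :=
  (h_ + 1) * (v + 1) ≠ 0 ∧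
  (PySem.Int.mod ((grid.map (fun row => (PySem.List.count row "@" : Int))).sum)
      ((h_ + 1) * (v + 1)) ≠ 0 ∨
    PySem.Int.floordiv ((grid.map (fun row => (PySem.List.count row "@" : Int))).sum)
      ((h_ + 1) * (v + 1)) = 0 ∨
    (1 ≤ r ∧ 1 ≤ c ∧ 0 ≤ h_ ∧ 0 ≤ v ∧ grid.length = r.toNat ∧ ∀ row ∈ grid, row.length = c.toNat))
instance (r : Int) (c : Int) (h_ : Int) (v : Int) (grid : List (List String)) : Decidable (Pre_Solution r c h_ v grid) := by unfold Pre_Solution; infer_instance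

def pvWitness_Solution : Int × Int × Int × Int × List (List String) := (1, 1, 0, 0, [["@"]])

def Spec_Solution (r : Int) (c : Int) (h_ : Int) (v : Int) (grid : List (List String)) (out : String) : Prop := out = Solution_alt r c h_ v grid
instance (r : Int) (c : Int) (h_ : Int) (v : Int) (grid : List (List String)) (out : String) : Decidable (Spec_Solution r c h_ v grid out) := by unfold Spec_Solution; infer_instance

-- ===== CLAIM (what is proved, stated in full; the proofs are below) =====
def Claim_equal_Solution : Prop := ∀ (r : Int) (c : Int) (h_ : Int) (v : Int) (grid : List (List String)), Dom_Solution r c h_ v grid → Pre_Solution r c h_ v grid → Spec_Solution r c h_ v grid (Solution r c h_ v grid)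

-- ===== LEMMAS AND PROOFS =====


-- generic: countP as a range sum
theorem pv_countP_eq_sum {α : Type} (p : α → Bool) (d : α) (l : List α) :
    ((l.countP p : Nat) : Int) = ∑ j ∈ Finset.range l.length, (if p (l.getD j d) = true then (1:Int) else 0) := by
  induction l with
  | nil => simp
  | cons a t ih =>
    rw [List.length_cons, Finset.sum_range_succ' (fun j => if p ((a :: t).getD j d) = true then (1:Int) else 0) t.length]
    simp only [List.getD_cons_succ, List.getD_cons_zero, List.countP_cons]
    rw [← ih]
    split <;> simp <;> omega

-- generic: fold with an if-guard = fold over the filtered list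
theorem pv_filter_fold {α δ : Type} (P : α → Prop) [DecidablePred P] (g : δ → α → δ) :
    ∀ (l : List α) (d0 : δ),
      l.foldl (fun d x => if P x then g d x else d) d0
        = (l.filter (fun x => decide (P x))).foldl g d0 := by
  intro l
  induction l with
  | nil => intro d0; rfl
  | cons a t ih =>
    intro d0
    by_cases h : P a <;> simp [h, ih]

-- generic: nested fold = fold over flatMap
theorem pv_flat_fold {α β δ : Type} (K : α → List β) (g : δ → β → δ) :
    ∀ (l : List α) (d0 : δ),
      l.foldl (fun d x => (K x).foldl g d) d0 = (l.flatMap K).foldl g d0 := by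
  intro l
  induction l with
  | nil => intro d0; rfl
  | cons a t ih => intro d0; simp [ih, List.foldl_append]

-- generic: sum of a map over enumerate as a range sum
theorem pv_sum_enumerate {α : Type} (g : Int × α → Int) (d : α) :
    ∀ (xs : List α) (s : Int),
      ((PySem.List.enumerate xs s).map g).sum
        = ∑ j ∈ Finset.range xs.length, g (s + j, xs.getD j d) := by
  intro xs
  induction xs with
  | nil => intro s; simp [PySem.List.enumerate]
  | cons a t ih =>
    intro s
    rw [PySem.List.enumerate_cons, List.length_cons,
      Finset.sum_range_succ' (fun j => g (s + j, (a :: t).getD j d)) t.length]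
    simp only [List.getD_cons_succ, List.getD_cons_zero, List.map_cons, List.sum_cons]
    rw [ih (s+1), add_comm]
    congr 1
    · apply Finset.sum_congr rfl
      intro j hj
      congr 2
      push_cast
      ring
    · norm_num

-- countP over enumerate as a range sum
theorem pv_countP_enumerate {α : Type} (p : Int × α → Bool) (d : α) :
    ∀ (xs : List α) (s : Int),
      (((PySem.List.enumerate xs s).countP p : Nat) : Int)
        = ∑ j ∈ Finset.range xs.length, (if p (s + j, xs.getD j d) = true then (1:Int) else 0) := by
  intro xs
  induction xs with
  | nil => intro s; simp [PySem.List.enumerate]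
  | cons a t ih =>
    intro s
    rw [PySem.List.enumerate_cons, List.length_cons,
      Finset.sum_range_succ' (fun j => if p (s + j, (a :: t).getD j d) = true then (1:Int) else 0) t.length]
    simp only [List.getD_cons_succ, List.getD_cons_zero, List.countP_cons]
    push_cast
    rw [ih (s+1)]
    congr 1
    · apply Finset.sum_congr rfl
      intro j hj
      congr 2
      push_cast
      ring
    · norm_num


def pvCI (grid : List (List String)) (i j : Nat) : Int :=
  if (grid.getD i []).getD j "" = "@" then 1 else 0

def pvS (grid : List (List String)) (x y : Nat) : Int :=
  ∑ i ∈ Finset.range (x + 1), ∑ j ∈ Finset.range (y + 1), pvCI grid i j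

def pvRowPre (grid : List (List String)) (i m : Nat) : Int :=
  ∑ j ∈ Finset.range m, pvCI grid i j

def pvColS (grid : List (List String)) (R j : Nat) : Int :=
  ∑ i ∈ Finset.range R, pvCI grid i j

def pvMidrow (grid : List (List String)) (C k m : Nat) : List Int :=
  (List.range C).map (fun j => if j < m then pvS grid k j else 0)

def pvDsAfter (grid : List (List String)) (R C k : Nat) : List (List Int) :=
  (List.range R).map (fun i => if i < k then (List.range C).map (fun j => pvS grid i j) else List.replicate C 0)

def pvInnerStep (grid : List (List String)) (k : Nat) (st : Int × List (List Int)) (j : Nat) :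
    Int × List (List Int) :=
  let c_sum := if (grid.getD k []).getD j "" = "@" then st.1 + 1 else st.1
  let value := c_sum + (if 0 < k then ((st.2.getD (k - 1) []).getD j 0) else 0)
  (c_sum, st.2.set k ((st.2.getD k []).set j value))

-- getD of set
theorem pv_getD_set {α : Type} (l : List α) (i j : Nat) (v d : α) :
    (l.set i v).getD j d = if j = i ∧ i < l.length then v else l.getD j d := by
  by_cases h : i = j
  · subst h
    by_cases hl : i < l.length
    · simp [List.getD_eq_getElem?_getD, List.getElem?_set, hl]
    · rw [List.getD_eq_getElem?_getD, List.getD_eq_getElem?_getD, List.getElem?_set,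
        List.getElem?_eq_none (by omega)]
      have hno : ¬ (i = i ∧ i < l.length) := fun hc => hl hc.2
      simp [hl, hno]
  · have hno : ¬ (j = i ∧ i < l.length) := fun hc => h hc.1.symm
    simp [List.getD_eq_getElem?_getD, List.getElem?_set, h, hno]

theorem pv_rowPre_succ (grid : List (List String)) (k m : Nat) :
    pvRowPre grid k (m + 1) = pvRowPre grid k m + pvCI grid k m := by
  simp [pvRowPre, Finset.sum_range_succ]

theorem pv_S_rec (grid : List (List String)) (k m : Nat) :
    pvS grid k m = pvRowPre grid k (m + 1) + (if 0 < k then pvS grid (k - 1) m else 0) := by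
  rcases Nat.eq_zero_or_pos k with hk | hk
  · subst hk; simp [pvS, pvRowPre]
  · have hk1 : k - 1 + 1 = k := Nat.succ_pred_eq_of_pos hk
    simp only [if_pos hk, pvS, pvRowPre, hk1]
    rw [Finset.sum_range_succ (fun i => ∑ j ∈ Finset.range (m + 1), pvCI grid i j) k]
    ring

theorem pv_midrow_zero (grid : List (List String)) (C k : Nat) :
    pvMidrow grid C k 0 = List.replicate C 0 := by
  rw [List.eq_replicate_iff]
  refine ⟨by simp [pvMidrow], ?_⟩
  intro b hb
  simp only [pvMidrow, List.mem_map] at hb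
  obtain ⟨j, hjC, hj⟩ := hb
  rw [if_neg (Nat.not_lt_zero j)] at hj
  exact hj.symm

theorem pv_midrow_set (grid : List (List String)) (C k m : Nat) (hm : m < C) :
    (pvMidrow grid C k m).set m (pvS grid k m) = pvMidrow grid C k (m + 1) := by
  apply List.ext_getElem
  · simp [pvMidrow]
  · intro n h1 h2
    simp only [pvMidrow, List.length_set, List.length_map, List.length_range] at h1 h2 ⊢
    rw [List.getElem_set]
    simp only [List.getElem_map, List.getElem_range]
    split_ifs <;> simp_all <;> omega

theorem pv_dsAfter_set_zero (grid : List (List String)) (R C k : Nat) (hk : k < R) :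
    (pvDsAfter grid R C k).set k (pvMidrow grid C k 0) = pvDsAfter grid R C k := by
  rw [pv_midrow_zero]
  apply List.ext_getElem
  · simp [pvDsAfter]
  · intro n h1 h2
    rw [List.getElem_set]
    by_cases hn : k = n
    · subst hn
      simp [pvDsAfter, Nat.lt_irrefl]
    · simp [pvDsAfter, hn]

theorem pv_dsAfter_set_full (grid : List (List String)) (R C k : Nat) (hk : k < R) :
    (pvDsAfter grid R C k).set k (pvMidrow grid C k C) = pvDsAfter grid R C (k + 1) := by
  apply List.ext_getElem
  · simp [pvDsAfter]
  · intro n h1 h2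
    rw [List.getElem_set]
    by_cases hn : k = n
    · subst hn
      simp only [pvDsAfter, List.getElem_map, List.getElem_range, if_pos (Nat.lt_succ_self k),
        pvMidrow]
      apply List.map_congr_left
      intro j hj
      simp only [List.mem_range] at hj
      simp [hj]
    · simp only [pvDsAfter, List.getElem_map, List.getElem_range]
      have h2' : n < R := by simpa [pvDsAfter] using h2
      split_ifs <;> first | rfl | omega

theorem pv_dsAfter_length (grid : List (List String)) (R C k : Nat) :
    (pvDsAfter grid R C k).length = R := by simp [pvDsAfter]

theorem pv_dsAfter_getD (grid : List (List String)) (R C k i : Nat) (hi : i < R) :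
    (pvDsAfter grid R C k).getD i []
      = if i < k then (List.range C).map (fun j => pvS grid i j) else List.replicate C 0 :=
  PySem.List.getD_map_range _ _ _ _ hi

theorem pv_inner_step (grid : List (List String)) (R C k m : Nat) (hkR : k < R) (hmC : m < C) :
    pvInnerStep grid k (pvRowPre grid k m, (pvDsAfter grid R C k).set k (pvMidrow grid C k m)) m
      = (pvRowPre grid k (m + 1), (pvDsAfter grid R C k).set k (pvMidrow grid C k (m + 1))) := by
  have hlen : (pvDsAfter grid R C k).length = R := pv_dsAfter_length grid R C k
  have hcs : (if (grid.getD k []).getD m "" = "@" then pvRowPre grid k m + 1 else pvRowPre grid k m)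
      = pvRowPre grid k (m + 1) := by
    rw [pv_rowPre_succ]; unfold pvCI; split_ifs <;> ring
  have hself : (((pvDsAfter grid R C k).set k (pvMidrow grid C k m)).getD k []) = pvMidrow grid C k m := by
    rw [pv_getD_set]; simp [hlen, hkR]
  have hprev : 0 < k →
      (((pvDsAfter grid R C k).set k (pvMidrow grid C k m)).getD (k - 1) []).getD m 0
        = pvS grid (k - 1) m := by
    intro hk0
    have hne : k - 1 ≠ k := by omega
    rw [pv_getD_set, if_neg (fun hc => hne hc.1),
      pv_dsAfter_getD grid R C k (k - 1) (by omega), if_pos (by omega)]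
    exact PySem.List.getD_map_range _ _ _ _ hmC
  unfold pvInnerStep
  simp only [hcs, hself, Prod.mk.injEq]
  refine ⟨trivial, ?_⟩
  rw [List.set_set]
  congr 1
  · have hval : pvRowPre grid k (m + 1) + (if 0 < k then
        ((((pvDsAfter grid R C k).set k (pvMidrow grid C k m)).getD (k - 1) []).getD m 0) else 0)
        = pvS grid k m := by
      rcases Nat.eq_zero_or_pos k with hk0 | hk0
      · subst hk0; rw [pv_S_rec]; simp
      · rw [if_pos hk0, hprev hk0, pv_S_rec grid k m, if_pos hk0]
    rw [hval, pv_midrow_set grid C k m hmC]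

theorem pv_inner_fold (grid : List (List String)) (R C k : Nat) (hkR : k < R) :
    ∀ m, m ≤ C →
      (List.range m).foldl (pvInnerStep grid k) (0, pvDsAfter grid R C k)
        = (pvRowPre grid k m, (pvDsAfter grid R C k).set k (pvMidrow grid C k m)) := by
  intro m
  induction m with
  | zero =>
    intro _
    rw [pv_dsAfter_set_zero grid R C k hkR]
    simp [pvRowPre]
  | succ m ih =>
    intro hm
    rw [List.range_succ, List.foldl_append, ih (by omega), List.foldl_cons, List.foldl_nil,
      pv_inner_step grid R C k m hkR (by omega)]

theorem pv_outer_fold (grid : List (List String)) (R C : Nat) :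
    ∀ n, n ≤ R →
      (List.range n).foldl (fun ds k => ((List.range C).foldl (pvInnerStep grid k) (0, ds)).2)
          (pvDsAfter grid R C 0)
        = pvDsAfter grid R C n := by
  intro n
  induction n with
  | zero => intro _; rfl
  | succ n ih =>
    intro hn
    rw [List.range_succ, List.foldl_append, ih (by omega), List.foldl_cons, List.foldl_nil,
      pv_inner_fold grid R C n (by omega) C (le_refl C), pv_dsAfter_set_full grid R C n (by omega)]

theorem pv_ds_read (grid : List (List String)) (R C x y : Nat) (hx : x < R) (hy : y < C) :
    ((pvDsAfter grid R C R).getD x []).getD y 0 = pvS grid x y := by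
  rw [pv_dsAfter_getD grid R C R x hx, if_pos hx]
  exact PySem.List.getD_map_range _ _ _ _ hy

theorem pv_S_col (grid : List (List String)) (R y : Nat) (hR : 0 < R) :
    pvS grid (R - 1) y = ∑ k ∈ Finset.range (y + 1), pvColS grid R k := by
  unfold pvS pvColS
  rw [show R - 1 + 1 = R from by omega, Finset.sum_comm]

theorem pv_S_rowfull (grid : List (List String)) (C i : Nat) (hC : 0 < C) :
    pvS grid i (C - 1) = ∑ k ∈ Finset.range (i + 1), pvRowPre grid k C := by
  unfold pvS pvRowPre
  rw [show C - 1 + 1 = C from by omega]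


def pvChain : Int → List Int → List (Int × Int)
  | _, [] => []
  | p, x :: xs => (p, x) :: pvChain (x + 1) xs

theorem pv_chain_length : ∀ (xs : List Int) (p : Int), (pvChain p xs).length = xs.length := by
  intro xs
  induction xs with
  | nil => intro p; rfl
  | cons a t ih => intro p; simp [pvChain, ih]

theorem pv_chain_getD : ∀ (xs : List Int) (p : Int) (k : Nat), k < xs.length →
    (pvChain p xs).getD k (0, 0)
      = (if k = 0 then p else xs.getD (k - 1) 0 + 1, xs.getD k 0) := by
  intro xs
  induction xs with
  | nil => intro p k hk; simp at hk
  | cons a t ih =>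
    intro p k hk
    cases k with
    | zero => simp [pvChain]
    | succ m =>
      simp only [pvChain, List.getD_cons_succ]
      rw [ih (a + 1) m (by simpa using hk)]
      cases m with
      | zero => simp
      | succ m' => simp

theorem pv_forall_mem_getD {α : Type} (d : α) (L : List α) (P : α → Prop) :
    (∀ x ∈ L, P x) ↔ ∀ k, k < L.length → P (L.getD k d) := by
  constructor
  · intro h k hk
    rw [List.getD_eq_getElem L d hk]
    exact h _ (List.getElem_mem hk)
  · intro h x hx
    obtain ⟨k, hk, rfl⟩ := List.mem_iff_getElem.1 hx
    have := h k hk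
    rwa [List.getD_eq_getElem L d hk] at this

theorem pv_sorted_filter_len : ∀ (L : List Int), L.Pairwise (· < ·) → ∀ (x : Int) (k : Nat),
    k < L.length →
    (((L.filter (fun t => decide (t < x))).length = k)
      ↔ ((k = 0 ∨ L.getD (k - 1) 0 < x) ∧ ¬ (L.getD k 0 < x))) := by
  intro L
  induction L with
  | nil => intro _ x k hk; simp at hk
  | cons a t ih =>
    intro hp x k hk
    obtain ⟨ha, htl⟩ := List.pairwise_cons.1 hp
    cases k with
    | zero =>
      by_cases hax : a < x
      · simp [List.filter_cons, hax]
      · have hall : ∀ b ∈ t, ¬ (b < x) := fun b hb hbx => hax (lt_trans (ha b hb) hbx)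
        have hfil : t.filter (fun t => decide (t < x)) = [] := by
          rw [List.filter_eq_nil_iff]; intro b hb; simpa using hall b hb
        simp [List.filter_cons, hax, hfil]
    | succ m =>
      have hmt : m < t.length := by simpa using hk
      by_cases hax : a < x
      · rw [List.filter_cons, if_pos (show decide (a < x) = true by simpa using hax),
          List.length_cons]
        have iht := ih htl x m hmt
        constructor
        · intro hlen
          have hm : (t.filter (fun t => decide (t < x))).length = m := by omega
          obtain ⟨h1, h2⟩ := iht.1 hm
          refine ⟨?_, by simpa using h2⟩
          cases m with
          | zero => exact Or.inr (by simpa using hax)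
          | succ m' =>
            have h1' := h1.resolve_left (by omega)
            exact Or.inr (by simpa using h1')
        · intro ⟨h1, h2⟩
          have hm : (t.filter (fun t => decide (t < x))).length = m := by
            apply iht.2
            refine ⟨?_, by simpa using h2⟩
            cases m with
            | zero => exact Or.inl rfl
            | succ m' =>
              have h1' := h1.resolve_left (by omega)
              exact Or.inr (by simpa using h1')
          omega
      · have hall : ∀ b ∈ t, ¬ (b < x) := fun b hb hbx => hax (lt_trans (ha b hb) hbx)
        have hfil : t.filter (fun t => decide (t < x)) = [] := by
          rw [List.filter_eq_nil_iff]; intro b hb; simpa using hall b hb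
        rw [List.filter_cons, if_neg (show ¬ decide (a < x) = true by simpa using hax), hfil]
        constructor
        · intro hlen; simp at hlen
        · intro ⟨h1, h2⟩
          exfalso
          have h1' := h1.resolve_left (by omega)
          cases m with
          | zero => exact hax (by simpa using h1')
          | succ m' =>
            have h1'' : t.getD m' 0 < x := by simpa using h1'
            have hm't : m' < t.length := by omega
            rw [List.getD_eq_getElem t 0 hm't] at h1''
            exact hall _ (List.getElem_mem hm't) h1''

theorem pv_greedy_aux (t : Int) (f P : Nat → Int)
    (hP : ∀ j, P j = ∑ k ∈ Finset.range (j + 1), f k) :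
    ∀ n : Nat,
      (((List.range n).foldl
          (fun (st : List Int × Int) j => if P j - st.2 = t then (st.1 ++ [(j : Int)], P j) else st)
          ([], 0)).1
        = ((List.range n).foldl
          (fun (st : List Int × Int) j =>
            if st.2 + f j = t then (st.1 ++ [(j : Int)], 0) else (st.1, st.2 + f j))
          ([], 0)).1)
      ∧ ((List.range n).foldl
          (fun (st : List Int × Int) j => if P j - st.2 = t then (st.1 ++ [(j : Int)], P j) else st)
          ([], 0)).2
        + ((List.range n).foldl
          (fun (st : List Int × Int) j =>
            if st.2 + f j = t then (st.1 ++ [(j : Int)], 0) else (st.1, st.2 + f j))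
          ([], 0)).2
        = ∑ k ∈ Finset.range n, f k := by
  intro n
  induction n with
  | zero => simp
  | succ n ih =>
    obtain ⟨h1, h2⟩ := ih
    simp only [List.range_succ, List.foldl_append, List.foldl_cons, List.foldl_nil]
    have hPn : P n = (∑ k ∈ Finset.range n, f k) + f n := by
      rw [hP n, Finset.sum_range_succ]
    have hiff : (P n - ((List.range n).foldl
          (fun (st : List Int × Int) j => if P j - st.2 = t then (st.1 ++ [(j : Int)], P j) else st)
          ([], 0)).2 = t)
        ↔ (((List.range n).foldl
          (fun (st : List Int × Int) j =>
            if st.2 + f j = t then (st.1 ++ [(j : Int)], 0) else (st.1, st.2 + f j))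
          ([], 0)).2 + f n = t) := by
      constructor <;> intro hcc <;> linarith [hPn, h2, hcc]
    by_cases hc : P n - ((List.range n).foldl
          (fun (st : List Int × Int) j => if P j - st.2 = t then (st.1 ++ [(j : Int)], P j) else st)
          ([], 0)).2 = t
    · rw [if_pos hc, if_pos (hiff.1 hc)]
      refine ⟨by rw [h1], ?_⟩
      simp only []
      rw [Finset.sum_range_succ]
      linarith [hPn]
    · rw [if_neg hc, if_neg (fun hx => hc (hiff.2 hx))]
      refine ⟨h1, ?_⟩
      simp only []
      rw [Finset.sum_range_succ]
      linarith

theorem pv_greedy_shape (t : Int) (f : Nat → Int) :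
    ∀ n : Nat,
      (((List.range n).foldl
          (fun (st : List Int × Int) j =>
            if st.2 + f j = t then (st.1 ++ [(j : Int)], 0) else (st.1, st.2 + f j))
          ([], 0)).1.Pairwise (· < ·))
      ∧ ∀ x ∈ ((List.range n).foldl
          (fun (st : List Int × Int) j =>
            if st.2 + f j = t then (st.1 ++ [(j : Int)], 0) else (st.1, st.2 + f j))
          ([], 0)).1, 0 ≤ x ∧ x < (n : Int) := by
  intro n
  induction n with
  | zero => simp
  | succ n ih =>
    obtain ⟨h1, h2⟩ := ih
    simp only [List.range_succ, List.foldl_append, List.foldl_cons, List.foldl_nil]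
    split_ifs with hc
    · refine ⟨?_, ?_⟩
      · rw [List.pairwise_append]
        refine ⟨h1, by simp, ?_⟩
        intro x hx y hy
        simp only [List.mem_singleton] at hy
        subst hy
        exact (h2 x hx).2
      · intro x hx
        rcases List.mem_append.1 hx with hx | hx
        · obtain ⟨hx0, hxn⟩ := h2 x hx
          refine ⟨hx0, by push_cast; omega⟩
        · simp only [List.mem_singleton] at hx
          subst hx
          refine ⟨by positivity, by push_cast; omega⟩
    · refine ⟨h1, ?_⟩
      intro x hx
      obtain ⟨hx0, hxn⟩ := h2 x hx
      refine ⟨hx0, by push_cast; omega⟩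

theorem pvChain_cons (p x : Int) (xs : List Int) :
    pvChain p (x :: xs) = (p, x) :: pvChain (x + 1) xs := rfl

def pvBox (grid : List (List String)) (i1 i2 j1 j2 : Nat) : Int :=
  ∑ i ∈ Finset.Ico i1 i2, ∑ j ∈ Finset.Ico j1 j2, pvCI grid i j

theorem pv_S_eq_box (grid : List (List String)) (x y : Nat) :
    pvS grid x y = pvBox grid 0 (x + 1) 0 (y + 1) := by
  unfold pvS pvBox
  simp only [← Nat.Ico_zero_eq_range]

theorem pv_box_split_rows (grid : List (List String)) (i1 i2 i3 j1 j2 : Nat)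
    (h1 : i1 ≤ i2) (h2 : i2 ≤ i3) :
    pvBox grid i1 i3 j1 j2 = pvBox grid i1 i2 j1 j2 + pvBox grid i2 i3 j1 j2 :=
  (Finset.sum_Ico_consecutive _ h1 h2).symm

theorem pv_box_split_cols (grid : List (List String)) (i1 i2 j1 j2 j3 : Nat)
    (h1 : j1 ≤ j2) (h2 : j2 ≤ j3) :
    pvBox grid i1 i2 j1 j3 = pvBox grid i1 i2 j1 j2 + pvBox grid i1 i2 j2 j3 := by
  unfold pvBox
  rw [← Finset.sum_add_distrib]
  apply Finset.sum_congr rfl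
  intro i _
  exact (Finset.sum_Ico_consecutive _ h1 h2).symm

theorem pv_incl_excl_row (grid : List (List String)) (x y px : Nat) (hpx : px ≤ x) :
    pvS grid x y - pvS grid px y = pvBox grid (px + 1) (x + 1) 0 (y + 1) := by
  rw [pv_S_eq_box, pv_S_eq_box,
    pv_box_split_rows grid 0 (px + 1) (x + 1) 0 (y + 1) (by omega) (by omega)]
  ring

theorem pv_incl_excl_col (grid : List (List String)) (x y py : Nat) (hpy : py ≤ y) :
    pvS grid x y - pvS grid x py = pvBox grid 0 (x + 1) (py + 1) (y + 1) := by
  rw [pv_S_eq_box, pv_S_eq_box,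
    pv_box_split_cols grid 0 (x + 1) 0 (py + 1) (y + 1) (by omega) (by omega)]
  ring

theorem pv_incl_excl_both (grid : List (List String)) (x y px py : Nat)
    (hpx : px ≤ x) (hpy : py ≤ y) :
    pvS grid x y - pvS grid px y - pvS grid x py + pvS grid px py
      = pvBox grid (px + 1) (x + 1) (py + 1) (y + 1) := by
  have h1 := pv_incl_excl_row grid x y px hpx
  have h2 := pv_incl_excl_row grid x py px hpx
  have h3 := pv_box_split_cols grid (px + 1) (x + 1) 0 (py + 1) (y + 1) (by omega) (by omega)
  linarith

theorem pv_getSum_closed (grid : List (List String)) (R C : Nat) (x y px py : Nat) (k0 l0 : Bool)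
    (hx : x < R) (hy : y < C) (hpx : px < R) (hpy : py < C) :
    pvA_getSum (pvDsAfter grid R C R) (if k0 then (px : Int) else -1) (if l0 then (py : Int) else -1)
        (x : Int) (y : Int)
      = pvS grid x y - (if k0 then pvS grid px y else 0) - (if l0 then pvS grid x py else 0)
        + (if k0 && l0 then pvS grid px py else 0) := by
  have e1 : PySem.List.pyGetD (PySem.List.pyGetD (pvDsAfter grid R C R) (x : Int) []) (y : Int) 0
      = pvS grid x y := by
    rw [PySem.List.pyGetD_natCast, PySem.List.pyGetD_natCast]; exact pv_ds_read grid R C x y hx hy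
  have e2 : PySem.List.pyGetD (PySem.List.pyGetD (pvDsAfter grid R C R) (px : Int) []) (y : Int) 0
      = pvS grid px y := by
    rw [PySem.List.pyGetD_natCast, PySem.List.pyGetD_natCast]; exact pv_ds_read grid R C px y hpx hy
  have e3 : PySem.List.pyGetD (PySem.List.pyGetD (pvDsAfter grid R C R) (x : Int) []) (py : Int) 0
      = pvS grid x py := by
    rw [PySem.List.pyGetD_natCast, PySem.List.pyGetD_natCast]; exact pv_ds_read grid R C x py hx hpy
  have e4 : PySem.List.pyGetD (PySem.List.pyGetD (pvDsAfter grid R C R) (px : Int) []) (py : Int) 0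
      = pvS grid px py := by
    rw [PySem.List.pyGetD_natCast, PySem.List.pyGetD_natCast]; exact pv_ds_read grid R C px py hpx hpy
  cases k0 <;> cases l0 <;>
    simp only [pvA_getSum, Bool.false_eq_true, eq_self_iff_true, if_true, if_false,
      Bool.and_false, Bool.false_and, Bool.and_self, Bool.and_true, Bool.true_and]
  ·
    rw [if_neg (by norm_num : ¬ ((0:Int) ≤ -1 ∧ (0:Int) ≤ -1)), if_neg (by norm_num : ¬ (0:Int) ≤ -1),
      if_neg (by norm_num : ¬ (0:Int) ≤ -1), e1]
    norm_num
  · rw [if_neg (fun hcc => absurd hcc.1 (by norm_num) : ¬ ((0:Int) ≤ -1 ∧ (0:Int) ≤ (py:Int))),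
      if_neg (by norm_num : ¬ (0:Int) ≤ -1), if_pos (by positivity : (0:Int) ≤ (py:Int)), e1, e3]
    norm_num
  · rw [if_neg (fun hcc => absurd hcc.2 (by norm_num) : ¬ ((0:Int) ≤ (px:Int) ∧ (0:Int) ≤ -1)),
      if_pos (by positivity : (0:Int) ≤ (px:Int)), if_neg (by norm_num : ¬ (0:Int) ≤ -1), e1, e2]
    norm_num
  · rw [if_pos (⟨by positivity, by positivity⟩ : ((0:Int) ≤ (px:Int) ∧ (0:Int) ≤ (py:Int))),
      if_pos (by positivity : (0:Int) ≤ (px:Int)), if_pos (by positivity : (0:Int) ≤ (py:Int)),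
      e1, e2, e3, e4]
    ring

theorem pv_countP_flatMap {α β : Type} (p : β → Bool) (K : α → List β) :
    ∀ l : List α,
      ((List.countP p (l.flatMap K) : Nat) : Int)
        = (l.map (fun x => ((List.countP p (K x) : Nat) : Int))).sum := by
  intro l
  induction l with
  | nil => simp
  | cons a t ih =>
    simp only [List.flatMap_cons, List.countP_append, List.map_cons, List.sum_cons]
    push_cast
    rw [ih]

theorem pv_getD_map {α β : Type} (f : α → β) (l : List α) (k : Nat) (d : α) (dβ : β)
    (hk : k < l.length) : (l.map f).getD k dβ = f (l.getD k d) := by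
  rw [List.getD_eq_getElem _ _ (by simpa using hk), List.getD_eq_getElem _ _ hk, List.getElem_map]

theorem pv_inner_iff (ds : List (List Int)) (each last_h hor : Int) :
    ∀ (vs : List Int) (lv : Int),
      pvA_inner ds each last_h hor vs lv = true
        ↔ ∀ pr ∈ pvChain lv vs, pvA_getSum ds (last_h - 1) (pr.1 - 1) hor pr.2 = each := by
  intro vs
  induction vs with
  | nil => intro lv; simp [pvA_inner, pvChain]
  | cons a t ih =>
    intro lv
    rw [pvChain_cons]
    unfold pvA_inner
    split_ifs with hg
    · rw [ih (a + 1)]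
      constructor
      · intro h pr hpr
        rcases List.mem_cons.1 hpr with h1 | h1
        · subst h1; exact hg
        · exact h pr h1
      · intro h pr hpr
        exact h pr (List.mem_cons_of_mem _ hpr)
    · constructor
      · intro h; exact absurd h (by simp)
      · intro h; exact absurd (h (lv, a) (List.mem_cons_self)) hg

theorem pv_outer_iff (ds : List (List Int)) (each : Int) (vs : List Int) :
    ∀ (hs : List Int) (lh : Int),
      pvA_outer ds each vs hs lh = true
        ↔ ∀ pr ∈ pvChain lh hs, ∀ qr ∈ pvChain 0 vs,
            pvA_getSum ds (pr.1 - 1) (qr.1 - 1) pr.2 qr.2 = each := by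
  intro hs
  induction hs with
  | nil => intro lh; simp [pvA_outer, pvChain]
  | cons a t ih =>
    intro lh
    rw [pvChain_cons]
    unfold pvA_outer
    split_ifs with hg
    · rw [ih (a + 1)]
      constructor
      · intro h pr hpr
        rcases List.mem_cons.1 hpr with h1 | h1
        · subst h1
          intro qr hqr
          exact (pv_inner_iff ds each lh a vs 0).1 hg qr hqr
        · exact h pr h1
      · intro h pr hpr
        exact h pr (List.mem_cons_of_mem _ hpr)
    · constructor
      · intro h; exact absurd h (by simp)
      · intro h
        exact absurd ((pv_inner_iff ds each lh a vs 0).2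
          (h (lh, a) (List.mem_cons_self))) hg


theorem pv_row_count (row : List String) (a : Int) :
    row.foldl (fun a cell => if cell = "@" then a + 1 else a) a
      = a + (PySem.List.count row "@" : Int) := by
  induction row generalizing a with
  | nil => simp [PySem.List.count_eq]
  | cons x t ih =>
    simp only [List.foldl_cons, PySem.List.count_eq, List.count_cons] at *
    by_cases hx : x = "@"
    · simp only [if_pos hx, ih, hx]
      push_cast
      simp
      ring
    · have : (x == "@") = false := by simpa using hx
      simp only [if_neg hx, ih, this]
      push_cast
      simp

theorem pv_foldl_add_gen {α : Type} (f : α → Int) : ∀ (t : List α) (a : Int),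
    t.foldl (fun acc x => acc + f x) a = a + (t.map f).sum := by
  intro t
  induction t with
  | nil => intro a; simp
  | cons x t ih =>
    intro a
    simp only [List.foldl_cons, List.map_cons, List.sum_cons, ih]
    ring

theorem pv_total_norm (grid : List (List String)) :
    grid.foldl (fun acc row => row.foldl (fun a cell => if cell = "@" then a + 1 else a) acc) 0
      = (grid.map (fun row => (PySem.List.count row "@" : Int))).sum := by
  simp only [pv_row_count, pv_foldl_add_gen]
  simp

theorem pv_inner_body (grid : List (List String)) (k j : Nat) (st : Int × List (List Int)) :
    ((if PySem.List.pyGetD (PySem.List.pyGetD grid (0 + (k:Int)) []) (0 + (j:Int)) "" = "@" then st.1 + 1 else st.1,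
      PySem.List.pySetD st.2 (0 + (k:Int))
        (PySem.List.pySetD (PySem.List.pyGetD st.2 (0 + (k:Int)) []) (0 + (j:Int))
          ((if PySem.List.pyGetD (PySem.List.pyGetD grid (0 + (k:Int)) []) (0 + (j:Int)) "" = "@" then st.1 + 1 else st.1) +
            if 0 < (0 + (k:Int)) then PySem.List.pyGetD (PySem.List.pyGetD st.2 ((0 + (k:Int)) - 1) []) (0 + (j:Int)) 0 else 0))))
      = pvInnerStep grid k st j := by
  unfold pvInnerStep
  by_cases hk : 0 < k
  · simp only [zero_add, PySem.List.pyGetD_natCast, PySem.List.pySetD_natCast]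
    rw [if_pos (show (0:Int) < (k:Int) from by exact_mod_cast hk), if_pos hk,
      show ((k:Int) - 1) = ((k - 1 : Nat) : Int) from by omega, PySem.List.pyGetD_natCast]
  · simp only [zero_add, PySem.List.pyGetD_natCast, PySem.List.pySetD_natCast]
    rw [if_neg (show ¬ (0:Int) < (k:Int) from by exact_mod_cast hk), if_neg hk]

theorem pv_ds_norm (grid : List (List String)) (R C : Nat) :
    List.foldl
      (fun ds ri =>
        (List.foldl
            (fun (st : Int × List (List Int)) ci =>
              (if PySem.List.pyGetD (PySem.List.pyGetD grid ri []) ci "" = "@" then st.1 + 1 else st.1,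
                PySem.List.pySetD st.2 ri
                  (PySem.List.pySetD (PySem.List.pyGetD st.2 ri []) ci
                    ((if PySem.List.pyGetD (PySem.List.pyGetD grid ri []) ci "" = "@" then st.1 + 1 else st.1) +
                      if 0 < ri then PySem.List.pyGetD (PySem.List.pyGetD st.2 (ri - 1) []) ci 0 else 0))))
            (0, ds) (PySem.List.pyRange 0 (C:Int) 1)).2)
      (List.map (fun _ => List.replicate C (0:Int)) (PySem.List.pyRange 0 (R:Int) 1))
      (PySem.List.pyRange 0 (R:Int) 1)
    = pvDsAfter grid R C R := by
  rw [PySem.List.pyRange_one 0 (R:Int)]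
  simp only [sub_zero, Int.toNat_natCast, List.map_map, List.foldl_map]
  have hinit : (List.range R).map ((fun _ => List.replicate C (0:Int)) ∘ (fun k : Nat => (0:Int) + (k:Int)))
      = pvDsAfter grid R C 0 := by
    unfold pvDsAfter
    apply List.map_congr_left
    intro i _
    simp
  rw [hinit]
  rw [PySem.List.foldl_congr_mem (List.range R)
    _ (fun ds k => ((List.range C).foldl (pvInnerStep grid k) (0, ds)).2) (pvDsAfter grid R C 0) ?_]
  · exact pv_outer_fold grid R C R (le_refl R)
  · intro ds k hk
    rw [PySem.List.pyRange_one 0 (C:Int)]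
    simp only [sub_zero, Int.toNat_natCast, List.foldl_map]
    rw [PySem.List.foldl_congr_mem (List.range C) _ (pvInnerStep grid k) (0, ds) ?_]
    intro st j _
    exact pv_inner_body grid k j st

def pvCutsB (f : Nat → Int) (t : Int) (n : Nat) : List Int :=
  ((List.range n).foldl (fun (st : List Int × Int) j =>
      if st.2 + f j = t then (st.1 ++ [(j:Int)], 0) else (st.1, st.2 + f j)) ([], 0)).1

theorem pv_colS_eq (grid : List (List String)) (R : Nat) (hlen : grid.length = R) (j : Nat) :
    ((List.filter (fun row => decide (PySem.List.pyGetD row (j:Int) "" = "@")) grid).length : Int)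
      = pvColS grid R j := by
  rw [← List.countP_eq_length_filter, pv_countP_eq_sum _ ([] : List String)]
  unfold pvColS pvCI
  rw [hlen]
  apply Finset.sum_congr rfl
  intro i _
  simp [PySem.List.pyGetD_natCast]

theorem pv_rowPre_eq (grid : List (List String)) (C k : Nat)
    (hrows : ∀ row ∈ grid, row.length = C) (hk : k < grid.length) :
    ((List.count "@" (grid.getD k []) : Nat) : Int) = pvRowPre grid k C := by
  have hrow : (grid.getD k []).length = C := by
    rw [List.getD_eq_getElem _ _ hk]
    exact hrows _ (List.getElem_mem hk)
  have hcp : List.count "@" (grid.getD k []) = List.countP (fun cell => cell == "@") (grid.getD k []) := rfl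
  rw [hcp, pv_countP_eq_sum _ ("" : String), hrow]
  unfold pvRowPre pvCI
  apply Finset.sum_congr rfl
  intro j _
  simp

theorem pv_vertA_norm (grid : List (List String)) (R C : Nat) (hR : 0 < R) (t : Int) :
    (List.foldl
        (fun (st : List Int × Int) ci =>
          if PySem.List.pyGetD (PySem.List.pyGetD (pvDsAfter grid R C R) ((R:Int) - 1) []) ci 0 - st.2 = t then
            (st.1 ++ [ci], PySem.List.pyGetD (PySem.List.pyGetD (pvDsAfter grid R C R) ((R:Int) - 1) []) ci 0)
          else st)
        ([], 0) (PySem.List.pyRange 0 (C:Int) 1)).1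
      = pvCutsB (pvColS grid R) t C := by
  rw [PySem.List.pyRange_one 0 (C:Int)]
  simp only [sub_zero, Int.toNat_natCast, List.foldl_map]
  rw [PySem.List.foldl_congr_mem (List.range C) _
    (fun (st : List Int × Int) j =>
      if pvS grid (R - 1) j - st.2 = t then (st.1 ++ [(j:Int)], pvS grid (R - 1) j) else st)
    ([], 0) ?_]
  · exact (pv_greedy_aux t (pvColS grid R) (fun j => pvS grid (R - 1) j)
      (fun j => pv_S_col grid R j hR) C).1
  · intro st j hj
    have hjC : j < C := List.mem_range.1 hj
    have hre : PySem.List.pyGetD (PySem.List.pyGetD (pvDsAfter grid R C R) ((R:Int) - 1) [])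
        ((j:Int)) 0 = pvS grid (R - 1) j := by
      rw [show ((R:Int) - 1) = ((R - 1 : Nat) : Int) from by omega,
        PySem.List.pyGetD_natCast, PySem.List.pyGetD_natCast]
      exact pv_ds_read grid R C (R - 1) j (by omega) hjC
    simp only [zero_add]
    rw [hre]

theorem pv_horA_norm (grid : List (List String)) (R C : Nat) (hC : 0 < C) (t : Int) :
    (List.foldl
        (fun (st : List Int × Int) ri =>
          if PySem.List.pyGetD (PySem.List.pyGetD (pvDsAfter grid R C R) ri []) ((C:Int) - 1) 0 - st.2 = t then
            (st.1 ++ [ri], PySem.List.pyGetD (PySem.List.pyGetD (pvDsAfter grid R C R) ri []) ((C:Int) - 1) 0)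
          else st)
        ([], 0) (PySem.List.pyRange 0 (R:Int) 1)).1
      = pvCutsB (fun k => pvRowPre grid k C) t R := by
  rw [PySem.List.pyRange_one 0 (R:Int)]
  simp only [sub_zero, Int.toNat_natCast, List.foldl_map]
  rw [PySem.List.foldl_congr_mem (List.range R) _
    (fun (st : List Int × Int) k =>
      if pvS grid k (C - 1) - st.2 = t then (st.1 ++ [(k:Int)], pvS grid k (C - 1)) else st)
    ([], 0) ?_]
  · exact (pv_greedy_aux t (fun k => pvRowPre grid k C) (fun k => pvS grid k (C - 1))
      (fun k => pv_S_rowfull grid C k hC) R).1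
  · intro st k hk
    have hkR : k < R := List.mem_range.1 hk
    have hre : PySem.List.pyGetD (PySem.List.pyGetD (pvDsAfter grid R C R) ((k:Int)) [])
        ((C:Int) - 1) 0 = pvS grid k (C - 1) := by
      rw [show ((C:Int) - 1) = ((C - 1 : Nat) : Int) from by omega,
        PySem.List.pyGetD_natCast, PySem.List.pyGetD_natCast]
      exact pv_ds_read grid R C k (C - 1) hkR (by omega)
    simp only [zero_add]
    rw [hre]

theorem pv_vertB_norm (grid : List (List String)) (R C : Nat) (hlen : grid.length = R) (t : Int) :
    (List.foldl
        (fun (st : List Int × Int) ci =>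
          if st.2 + PySem.List.pyGetD
              (List.map (fun ci => ((List.filter (fun row => decide (PySem.List.pyGetD row ci "" = "@")) grid).length : Int))
                (PySem.List.pyRange 0 (C:Int) 1)) ci 0 = t then
            (st.1 ++ [ci], 0)
          else (st.1, st.2 + PySem.List.pyGetD
              (List.map (fun ci => ((List.filter (fun row => decide (PySem.List.pyGetD row ci "" = "@")) grid).length : Int))
                (PySem.List.pyRange 0 (C:Int) 1)) ci 0))
        ([], 0) (PySem.List.pyRange 0 (C:Int) 1)).1
      = pvCutsB (pvColS grid R) t C := by
  rw [PySem.List.foldl_congr_mem (PySem.List.pyRange 0 (C:Int) 1) _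
    (fun (st : List Int × Int) ci =>
      if st.2 + pvColS grid R ci.toNat = t then (st.1 ++ [ci], 0) else (st.1, st.2 + pvColS grid R ci.toNat))
    ([], 0) ?_]
  · rw [PySem.List.pyRange_one 0 (C:Int)]
    simp only [sub_zero, Int.toNat_natCast, List.foldl_map]
    unfold pvCutsB
    rw [PySem.List.foldl_congr_mem (List.range C) _
      (fun (st : List Int × Int) j =>
        if st.2 + pvColS grid R j = t then (st.1 ++ [(j:Int)], 0) else (st.1, st.2 + pvColS grid R j))
      ([], 0) ?_]
    intro st j _
    simp only [zero_add, Int.toNat_natCast]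
  · intro st ci hci
    obtain ⟨hci0, hciC⟩ := PySem.List.mem_pyRange_one.1 hci
    have hcast : ci = ((ci.toNat : Nat) : Int) := by omega
    have hlt : ci.toNat < C := by omega
    have hre : PySem.List.pyGetD
        (List.map (fun ci => ((List.filter (fun row => decide (PySem.List.pyGetD row ci "" = "@")) grid).length : Int))
          (PySem.List.pyRange 0 (C:Int) 1)) ci 0
        = pvColS grid R ci.toNat := by
      rw [hcast, PySem.List.pyGetD_map_pyRange _ C ci.toNat 0 hlt]
      rw [← hcast]
      rw [show (ci : Int) = ((ci.toNat : Nat) : Int) from hcast]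
      exact pv_colS_eq grid R hlen ci.toNat
    rw [hre]

theorem pv_horB_norm (grid : List (List String)) (R C : Nat) (hlen : grid.length = R)
    (hrows : ∀ row ∈ grid, row.length = C) (t : Int) :
    (List.foldl
        (fun (st : List Int × Int) ri =>
          if st.2 + PySem.List.pyGetD (List.map (fun row => ((PySem.List.count row "@" : Nat) : Int)) grid) ri 0 = t then
            (st.1 ++ [ri], 0)
          else (st.1, st.2 + PySem.List.pyGetD (List.map (fun row => ((PySem.List.count row "@" : Nat) : Int)) grid) ri 0))
        ([], 0) (PySem.List.pyRange 0 (R:Int) 1)).1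
      = pvCutsB (fun k => pvRowPre grid k C) t R := by
  rw [PySem.List.pyRange_one 0 (R:Int)]
  simp only [sub_zero, Int.toNat_natCast, List.foldl_map]
  unfold pvCutsB
  rw [PySem.List.foldl_congr_mem (List.range R) _
    (fun (st : List Int × Int) k =>
      if st.2 + pvRowPre grid k C = t then (st.1 ++ [(k:Int)], 0) else (st.1, st.2 + pvRowPre grid k C))
    ([], 0) ?_]
  intro st k hk
  have hkR : k < R := List.mem_range.1 hk
  have hre : PySem.List.pyGetD (List.map (fun row => ((PySem.List.count row "@" : Nat) : Int)) grid)
      ((k:Int)) 0 = pvRowPre grid k C := by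
    rw [PySem.List.pyGetD_natCast,
      pv_getD_map _ grid k ([] : List String) 0 (by omega)]
    rw [PySem.List.count_eq]
    exact pv_rowPre_eq grid C k hrows (by omega)
  simp only [zero_add]
  rw [hre]

theorem pv_cuts_sorted (f : Nat → Int) (t : Int) (n : Nat) :
    (pvCutsB f t n).Pairwise (· < ·) := by
  unfold pvCutsB
  exact (pv_greedy_shape t f n).1

theorem pv_cuts_mem (f : Nat → Int) (t : Int) (n : Nat) :
    ∀ x ∈ pvCutsB f t n, 0 ≤ x ∧ x < (n : Int) := by
  unfold pvCutsB
  exact (pv_greedy_shape t f n).2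

theorem pv_counts_getD (grid : List (List String)) (R C : Nat) (hlen : grid.length = R)
    (hrows : ∀ row ∈ grid, row.length = C) (HL VL : List Int) (key : Int × Int) :
    PySem.Dict.getD
      (List.foldl
        (fun (d : PySem.Dict (Int × Int) Int) p =>
          List.foldl
            (fun d q =>
              if q.2 = "@" then
                d.insert
                  (((List.filter (fun x => decide (x < p.1)) HL).length : Int),
                    ((List.filter (fun x => decide (x < q.1)) VL).length : Int))
                  (d.getD
                    (((List.filter (fun x => decide (x < p.1)) HL).length : Int),
                      ((List.filter (fun x => decide (x < q.1)) VL).length : Int)) 0 + 1)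
              else d)
            d (PySem.List.enumerate p.2 0))
        PySem.Dict.empty (PySem.List.enumerate grid 0)) key 0
    = ∑ i ∈ Finset.range R, ∑ j ∈ Finset.range C,
        (if (((List.filter (fun x => decide (x < (i:Int))) HL).length : Int),
              ((List.filter (fun x => decide (x < (j:Int))) VL).length : Int)) = key
            ∧ (grid.getD i []).getD j "" = "@" then (1:Int) else 0) := by
  rw [PySem.List.foldl_congr_mem (PySem.List.enumerate grid 0) _
    (fun (d : PySem.Dict (Int × Int) Int) p =>
      ((((PySem.List.enumerate p.2 0).filter (fun q => decide (q.2 = "@"))).map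
          (fun q => (((List.filter (fun x => decide (x < p.1)) HL).length : Int),
            ((List.filter (fun x => decide (x < q.1)) VL).length : Int)))).foldl
        (fun d x => d.insert x (d.getD x 0 + 1)) d))
    PySem.Dict.empty ?_]
  · rw [pv_flat_fold, PySem.Dict.getD_foldl_insert_add_one, PySem.Dict.getD_empty]
    have hcnt : List.count key ((PySem.List.enumerate grid 0).flatMap
        (fun p => (((PySem.List.enumerate p.2 0).filter (fun q => decide (q.2 = "@"))).map
          (fun q => (((List.filter (fun x => decide (x < p.1)) HL).length : Int),
            ((List.filter (fun x => decide (x < q.1)) VL).length : Int))))))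
        = List.countP (fun x => x == key) ((PySem.List.enumerate grid 0).flatMap
        (fun p => (((PySem.List.enumerate p.2 0).filter (fun q => decide (q.2 = "@"))).map
          (fun q => (((List.filter (fun x => decide (x < p.1)) HL).length : Int),
            ((List.filter (fun x => decide (x < q.1)) VL).length : Int)))))) := rfl
    rw [hcnt, pv_countP_flatMap, pv_sum_enumerate _ ([] : List String) grid 0, zero_add, hlen]
    apply Finset.sum_congr rfl
    intro i hi
    rw [List.countP_map, List.countP_filter, pv_countP_enumerate _ ("" : String)]
    have hi' : i < grid.length := by rw [hlen]; exact Finset.mem_range.1 hi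
    have hrowlen : (grid.getD i []).length = C := by
      rw [List.getD_eq_getElem _ _ hi']
      exact hrows _ (List.getElem_mem hi')
    simp only [zero_add]
    apply Finset.sum_congr (by simpa [List.getD_eq_getElem?_getD] using congrArg Finset.range hrowlen)
    intro j hj
    simp only [Function.comp_apply, Bool.and_eq_true, beq_iff_eq, decide_eq_true_eq]
  · intro d p hp
    rw [pv_filter_fold (fun (q : Int × String) => q.2 = "@") _ (PySem.List.enumerate p.2 0) d]
    beta_reduce
    exact (List.foldl_map (f := fun q : Int × String =>
        (((List.filter (fun x => decide (x < p.1)) HL).length : Int),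
          ((List.filter (fun x => decide (x < q.1)) VL).length : Int)))
      (g := fun (d : PySem.Dict (Int × Int) Int) x => d.insert x (d.getD x 0 + 1))).symm

theorem pv_getD_bounds (L : List Int) (N : Nat) (hb : ∀ x ∈ L, 0 ≤ x ∧ x < (N:Int))
    (k : Nat) (hk : k < L.length) : 0 ≤ L.getD k 0 ∧ L.getD k 0 < (N:Int) := by
  rw [List.getD_eq_getElem _ _ hk]
  exact hb _ (List.getElem_mem hk)

theorem pv_filter_range (L : List Int) (N : Nat) (hs : L.Pairwise (· < ·))
    (hb : ∀ x ∈ L, 0 ≤ x ∧ x < (N:Int)) (k : Nat) (hk : k < L.length) :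
    (Finset.range N).filter
        (fun (i : Nat) => ((L.filter (fun x => decide (x < (i:Int)))).length : Int) = ((k : Nat) : Int))
      = Finset.Ico (if k = 0 then 0 else (L.getD (k - 1) 0).toNat + 1) ((L.getD k 0).toNat + 1) := by
  have hkb := pv_getD_bounds L N hb k hk
  ext i
  simp only [Finset.mem_filter, Finset.mem_range, Finset.mem_Ico, Nat.cast_inj]
  rw [pv_sorted_filter_len L hs (i : Int) k hk]
  constructor
  · intro ⟨hiN, h1, h2⟩
    constructor
    · rcases h1 with h1 | h1
      · simp [h1]
      · split_ifs with hk0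
        · omega
        · have hkb' := pv_getD_bounds L N hb (k - 1) (by omega)
          omega
    · omega
  · intro ⟨h1, h2⟩
    refine ⟨by omega, ?_, by omega⟩
    rcases Nat.eq_zero_or_pos k with hk0 | hk0
    · exact Or.inl hk0
    · rw [if_neg (by omega)] at h1
      have hkb' := pv_getD_bounds L N hb (k - 1) (by omega)
      refine Or.inr (by omega)

theorem pv_bucket_box (grid : List (List String)) (R C : Nat) (HL VL : List Int)
    (hHs : HL.Pairwise (· < ·)) (hVs : VL.Pairwise (· < ·))
    (hHb : ∀ x ∈ HL, 0 ≤ x ∧ x < (R:Int)) (hVb : ∀ x ∈ VL, 0 ≤ x ∧ x < (C:Int))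
    (kn ln : Nat) (hkn : kn < HL.length) (hln : ln < VL.length) :
    (∑ i ∈ Finset.range R, ∑ j ∈ Finset.range C,
        (if (((List.filter (fun x => decide (x < (i:Int))) HL).length : Int),
              ((List.filter (fun x => decide (x < (j:Int))) VL).length : Int)) = ((kn:Int), (ln:Int))
            ∧ (grid.getD i []).getD j "" = "@" then (1:Int) else 0))
      = pvBox grid (if kn = 0 then 0 else (HL.getD (kn - 1) 0).toNat + 1) ((HL.getD kn 0).toNat + 1)
          (if ln = 0 then 0 else (VL.getD (ln - 1) 0).toNat + 1) ((VL.getD ln 0).toNat + 1) := by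
  have h1 : ∀ i j : Nat,
      (if (((List.filter (fun x => decide (x < (i:Int))) HL).length : Int),
            ((List.filter (fun x => decide (x < (j:Int))) VL).length : Int)) = ((kn:Int), (ln:Int))
          ∧ (grid.getD i []).getD j "" = "@" then (1:Int) else 0)
        = if ((List.filter (fun x => decide (x < (i:Int))) HL).length : Int) = ((kn:Int)) then
            (if ((List.filter (fun x => decide (x < (j:Int))) VL).length : Int) = ((ln:Int))
                ∧ (grid.getD i []).getD j "" = "@" then (1:Int) else 0)
          else 0 := by
    intro i j
    simp only [Prod.mk.injEq]
    by_cases hA : ((List.filter (fun x => decide (x < (i:Int))) HL).length : Int) = ((kn:Int)) <;>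
      by_cases hB : ((List.filter (fun x => decide (x < (j:Int))) VL).length : Int) = ((ln:Int)) <;>
        by_cases hCc : (grid.getD i []).getD j "" = "@" <;> simp [hA, hB, hCc]
  have h2 : ∀ j : Nat, ∀ i : Nat,
      (if ((List.filter (fun x => decide (x < (j:Int))) VL).length : Int) = ((ln:Int))
          ∧ (grid.getD i []).getD j "" = "@" then (1:Int) else 0)
        = if ((List.filter (fun x => decide (x < (j:Int))) VL).length : Int) = ((ln:Int)) then
            pvCI grid i j else 0 := by
    intro j i
    unfold pvCI
    by_cases hB : ((List.filter (fun x => decide (x < (j:Int))) VL).length : Int) = ((ln:Int)) <;>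
      by_cases hCc : (grid.getD i []).getD j "" = "@" <;> simp [hB, hCc]
  calc (∑ i ∈ Finset.range R, ∑ j ∈ Finset.range C,
        (if (((List.filter (fun x => decide (x < (i:Int))) HL).length : Int),
              ((List.filter (fun x => decide (x < (j:Int))) VL).length : Int)) = ((kn:Int), (ln:Int))
            ∧ (grid.getD i []).getD j "" = "@" then (1:Int) else 0))
      = ∑ i ∈ Finset.range R,
          (if ((List.filter (fun x => decide (x < (i:Int))) HL).length : Int) = ((kn:Int)) then
            (∑ j ∈ Finset.range C,
              if ((List.filter (fun x => decide (x < (j:Int))) VL).length : Int) = ((ln:Int))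
                  ∧ (grid.getD i []).getD j "" = "@" then (1:Int) else 0)
          else 0) := by
        apply Finset.sum_congr rfl
        intro i _
        rw [show (∑ j ∈ Finset.range C,
            (if (((List.filter (fun x => decide (x < (i:Int))) HL).length : Int),
              ((List.filter (fun x => decide (x < (j:Int))) VL).length : Int)) = ((kn:Int), (ln:Int))
            ∧ (grid.getD i []).getD j "" = "@" then (1:Int) else 0))
          = ∑ j ∈ Finset.range C,
            (if ((List.filter (fun x => decide (x < (i:Int))) HL).length : Int) = ((kn:Int)) then
              (if ((List.filter (fun x => decide (x < (j:Int))) VL).length : Int) = ((ln:Int))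
                  ∧ (grid.getD i []).getD j "" = "@" then (1:Int) else 0)
            else 0)
          from Finset.sum_congr rfl (fun j _ => h1 i j)]
        by_cases hA : ((List.filter (fun x => decide (x < (i:Int))) HL).length : Int) = ((kn:Int)) <;>
          simp [hA]
    _ = ∑ i ∈ (Finset.range R).filter
          (fun (i : Nat) => ((List.filter (fun x => decide (x < (i:Int))) HL).length : Int) = ((kn:Int))),
          (∑ j ∈ Finset.range C,
            if ((List.filter (fun x => decide (x < (j:Int))) VL).length : Int) = ((ln:Int))
                ∧ (grid.getD i []).getD j "" = "@" then (1:Int) else 0) := by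
        rw [Finset.sum_filter]
    _ = pvBox grid (if kn = 0 then 0 else (HL.getD (kn - 1) 0).toNat + 1) ((HL.getD kn 0).toNat + 1)
          (if ln = 0 then 0 else (VL.getD (ln - 1) 0).toNat + 1) ((VL.getD ln 0).toNat + 1) := by
        rw [pv_filter_range HL R hHs hHb kn hkn]
        unfold pvBox
        apply Finset.sum_congr rfl
        intro i _
        rw [show (∑ j ∈ Finset.range C,
            (if ((List.filter (fun x => decide (x < (j:Int))) VL).length : Int) = ((ln:Int))
                ∧ (grid.getD i []).getD j "" = "@" then (1:Int) else 0))
          = ∑ j ∈ Finset.range C,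
            (if ((List.filter (fun x => decide (x < (j:Int))) VL).length : Int) = ((ln:Int)) then
              pvCI grid i j else 0)
          from Finset.sum_congr rfl (fun j _ => h2 j i)]
        rw [← Finset.sum_filter, pv_filter_range VL C hVs hVb ln hln]

theorem pv_bool_eq {a b : Bool} (h : a = true ↔ b = true) : a = b := by
  cases a <;> cases b <;> simp_all

theorem pv_sorted_getD_lt (L : List Int) (hs : L.Pairwise (· < ·)) (a b : Nat)
    (hab : a < b) (hb : b < L.length) : L.getD a 0 < L.getD b 0 := by
  rw [List.getD_eq_getElem _ _ (by omega), List.getD_eq_getElem _ _ hb]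
  exact List.pairwise_iff_getElem.1 hs a b (by omega) hb hab

theorem pv_heval (grid : List (List String)) (R C : Nat) (HL VL : List Int)
    (hR : 0 < R) (hC : 0 < C)
    (hHs : HL.Pairwise (· < ·)) (hVs : VL.Pairwise (· < ·))
    (hHb : ∀ x ∈ HL, 0 ≤ x ∧ x < (R:Int)) (hVb : ∀ x ∈ VL, 0 ≤ x ∧ x < (C:Int))
    (kn ln : Nat) (hkn : kn < HL.length) (hln : ln < VL.length) :
    pvA_getSum (pvDsAfter grid R C R)
        ((if kn = 0 then (0:Int) else HL.getD (kn - 1) 0 + 1) - 1)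
        ((if ln = 0 then (0:Int) else VL.getD (ln - 1) 0 + 1) - 1)
        (HL.getD kn 0) (VL.getD ln 0)
      = pvBox grid (if kn = 0 then 0 else (HL.getD (kn - 1) 0).toNat + 1) ((HL.getD kn 0).toNat + 1)
          (if ln = 0 then 0 else (VL.getD (ln - 1) 0).toNat + 1) ((VL.getD ln 0).toNat + 1) := by
  have hxb := pv_getD_bounds HL R hHb kn hkn
  have hyb := pv_getD_bounds VL C hVb ln hln
  have hx : HL.getD kn 0 = (((HL.getD kn 0).toNat : Nat) : Int) := by omega
  have hy : VL.getD ln 0 = (((VL.getD ln 0).toNat : Nat) : Int) := by omega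
  have hxR : (HL.getD kn 0).toNat < R := by omega
  have hyC : (VL.getD ln 0).toNat < C := by omega
  by_cases hk0 : kn = 0 <;> by_cases hl0 : ln = 0
  · have := pv_getSum_closed grid R C (HL.getD kn 0).toNat (VL.getD ln 0).toNat 0 0 false false
      hxR hyC hR hC
    simp only [Bool.false_and, if_false, Bool.false_eq_true] at this
    rw [if_pos hk0, if_pos hl0, if_pos hk0, if_pos hl0,
      show ((0:Int) - 1) = -1 from by norm_num, hx, hy, this]
    simp only [Int.toNat_natCast]
    rw [pv_S_eq_box grid (HL.getD kn 0).toNat (VL.getD ln 0).toNat]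
    ring
  · have hpyb := pv_getD_bounds VL C hVb (ln - 1) (by omega)
    have hpy : VL.getD (ln - 1) 0 = (((VL.getD (ln - 1) 0).toNat : Nat) : Int) := by omega
    have hmono : VL.getD (ln - 1) 0 < VL.getD ln 0 :=
      pv_sorted_getD_lt VL hVs (ln - 1) ln (by omega) hln
    have := pv_getSum_closed grid R C (HL.getD kn 0).toNat (VL.getD ln 0).toNat 0
      (VL.getD (ln - 1) 0).toNat false true hxR hyC hR (by omega)
    simp only [Bool.false_and, if_false, if_true, Bool.false_eq_true] at this
    rw [if_pos hk0, if_neg hl0, if_pos hk0, if_neg hl0,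
      show ((0:Int) - 1) = -1 from by norm_num,
      show (VL.getD (ln - 1) 0 + 1 - 1) = ((((VL.getD (ln - 1) 0).toNat : Nat)) : Int) from by omega,
      hx, hy, this]
    simp only [Int.toNat_natCast]
    linarith [pv_incl_excl_col grid (HL.getD kn 0).toNat (VL.getD ln 0).toNat
      (VL.getD (ln - 1) 0).toNat (by omega)]
  · have hpxb := pv_getD_bounds HL R hHb (kn - 1) (by omega)
    have hmono : HL.getD (kn - 1) 0 < HL.getD kn 0 :=
      pv_sorted_getD_lt HL hHs (kn - 1) kn (by omega) hkn
    have := pv_getSum_closed grid R C (HL.getD kn 0).toNat (VL.getD ln 0).toNat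
      (HL.getD (kn - 1) 0).toNat 0 true false hxR hyC (by omega) hC
    simp only [Bool.and_false, if_false, if_true, Bool.false_eq_true] at this
    rw [if_neg hk0, if_pos hl0, if_neg hk0, if_pos hl0,
      show ((0:Int) - 1) = -1 from by norm_num,
      show (HL.getD (kn - 1) 0 + 1 - 1) = ((((HL.getD (kn - 1) 0).toNat : Nat)) : Int) from by omega,
      hx, hy, this]
    simp only [Int.toNat_natCast]
    linarith [pv_incl_excl_row grid (HL.getD kn 0).toNat (VL.getD ln 0).toNat
      (HL.getD (kn - 1) 0).toNat (by omega)]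
  · have hpxb := pv_getD_bounds HL R hHb (kn - 1) (by omega)
    have hpyb := pv_getD_bounds VL C hVb (ln - 1) (by omega)
    have hmonoH : HL.getD (kn - 1) 0 < HL.getD kn 0 :=
      pv_sorted_getD_lt HL hHs (kn - 1) kn (by omega) hkn
    have hmonoV : VL.getD (ln - 1) 0 < VL.getD ln 0 :=
      pv_sorted_getD_lt VL hVs (ln - 1) ln (by omega) hln
    have := pv_getSum_closed grid R C (HL.getD kn 0).toNat (VL.getD ln 0).toNat
      (HL.getD (kn - 1) 0).toNat (VL.getD (ln - 1) 0).toNat true true hxR hyC (by omega) (by omega)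
    simp only [Bool.and_self, if_true] at this
    rw [if_neg hk0, if_neg hl0, if_neg hk0, if_neg hl0,
      show (HL.getD (kn - 1) 0 + 1 - 1) = ((((HL.getD (kn - 1) 0).toNat : Nat)) : Int) from by omega,
      show (VL.getD (ln - 1) 0 + 1 - 1) = ((((VL.getD (ln - 1) 0).toNat : Nat)) : Int) from by omega,
      hx, hy, this]
    simp only [Int.toNat_natCast]
    linarith [pv_incl_excl_both grid (HL.getD kn 0).toNat (VL.getD ln 0).toNat
      (HL.getD (kn - 1) 0).toNat (VL.getD (ln - 1) 0).toNat (by omega) (by omega)]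

theorem pv_final (grid : List (List String)) (R C H V : Nat) (each : Int)
    (hR : 0 < R) (hC : 0 < C)
    (HL VL : List Int)
    (hHs : HL.Pairwise (· < ·)) (hVs : VL.Pairwise (· < ·))
    (hHb : ∀ x ∈ HL, 0 ≤ x ∧ x < (R:Int)) (hVb : ∀ x ∈ VL, 0 ≤ x ∧ x < (C:Int))
    (hlenH : HL.length = H + 1) (hlenV : VL.length = V + 1) :
    pvA_outer (pvDsAfter grid R C R) each VL HL 0
      = ((PySem.List.pyRange 0 ((H:Int) + 1) 1).all fun k =>
          (PySem.List.pyRange 0 ((V:Int) + 1) 1).all fun l =>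
            decide ((∑ i ∈ Finset.range R, ∑ j ∈ Finset.range C,
              (if (((List.filter (fun x => decide (x < (i:Int))) HL).length : Int),
                    ((List.filter (fun x => decide (x < (j:Int))) VL).length : Int)) = (k, l)
                  ∧ (grid.getD i []).getD j "" = "@" then (1:Int) else 0)) = each)) := by
  have hA : pvA_outer (pvDsAfter grid R C R) each VL HL 0 = true ↔
      (∀ kn, kn < H + 1 → ∀ ln, ln < V + 1 →
        pvBox grid (if kn = 0 then 0 else (HL.getD (kn - 1) 0).toNat + 1) ((HL.getD kn 0).toNat + 1)
          (if ln = 0 then 0 else (VL.getD (ln - 1) 0).toNat + 1) ((VL.getD ln 0).toNat + 1)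
          = each) := by
    rw [pv_outer_iff,
      pv_forall_mem_getD ((0:Int), (0:Int)) (pvChain 0 HL), pv_chain_length]
    constructor
    · intro h kn hkn ln hln
      have hkn' : kn < HL.length := by omega
      have hln' : ln < VL.length := by omega
      have h1 := h kn (by omega)
      rw [pv_forall_mem_getD ((0:Int), (0:Int)) (pvChain 0 VL), pv_chain_length] at h1
      have h2 := h1 ln (by omega)
      rw [pv_chain_getD HL 0 kn hkn', pv_chain_getD VL 0 ln hln'] at h2
      dsimp only at h2
      rw [pv_heval grid R C HL VL hR hC hHs hVs hHb hVb kn ln hkn' hln'] at h2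
      exact h2
    · intro h kn hkn
      rw [pv_forall_mem_getD ((0:Int), (0:Int)) (pvChain 0 VL), pv_chain_length]
      intro ln hln
      have hkn' : kn < HL.length := by omega
      have hln' : ln < VL.length := by omega
      rw [pv_chain_getD HL 0 kn hkn', pv_chain_getD VL 0 ln hln']
      dsimp only
      rw [pv_heval grid R C HL VL hR hC hHs hVs hHb hVb kn ln hkn' hln']
      exact h kn (by omega) ln (by omega)
  have hB : ((PySem.List.pyRange 0 ((H:Int) + 1) 1).all fun k =>
          (PySem.List.pyRange 0 ((V:Int) + 1) 1).all fun l =>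
            decide ((∑ i ∈ Finset.range R, ∑ j ∈ Finset.range C,
              (if (((List.filter (fun x => decide (x < (i:Int))) HL).length : Int),
                    ((List.filter (fun x => decide (x < (j:Int))) VL).length : Int)) = (k, l)
                  ∧ (grid.getD i []).getD j "" = "@" then (1:Int) else 0)) = each)) = true ↔
      (∀ kn, kn < H + 1 → ∀ ln, ln < V + 1 →
        pvBox grid (if kn = 0 then 0 else (HL.getD (kn - 1) 0).toNat + 1) ((HL.getD kn 0).toNat + 1)
          (if ln = 0 then 0 else (VL.getD (ln - 1) 0).toNat + 1) ((VL.getD ln 0).toNat + 1)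
          = each) := by
    rw [List.all_eq_true]
    constructor
    · intro h kn hkn ln hln
      have h1 := h ((kn : Nat) : Int) (PySem.List.mem_pyRange_one.2 ⟨by positivity, by push_cast; omega⟩)
      rw [List.all_eq_true] at h1
      have h2 := h1 ((ln : Nat) : Int) (PySem.List.mem_pyRange_one.2 ⟨by positivity, by push_cast; omega⟩)
      rw [decide_eq_true_eq,
        pv_bucket_box grid R C HL VL hHs hVs hHb hVb kn ln (by omega) (by omega)] at h2
      exact h2
    · intro h x hxm
      obtain ⟨hx0, hxlt⟩ := PySem.List.mem_pyRange_one.1 hxm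
      rw [List.all_eq_true]
      intro y hym
      obtain ⟨hy0, hylt⟩ := PySem.List.mem_pyRange_one.1 hym
      rw [decide_eq_true_eq,
        show x = ((x.toNat : Nat) : Int) from by omega,
        show y = ((y.toNat : Nat) : Int) from by omega,
        pv_bucket_box grid R C HL VL hHs hVs hHb hVb x.toNat y.toNat (by omega) (by omega)]
      exact h x.toNat (by omega) y.toNat (by omega)
  exact pv_bool_eq (hA.trans hB.symm)

-- ===== VERDICT (by name: the statement is the Claim_ definition above) =====
set_option maxHeartbeats 1000000 in
theorem Solution_spec : Claim_equal_Solution := by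
  intro r c h_ v grid _ hpre
  obtain ⟨hp0, hcase⟩ := hpre
  unfold Spec_Solution Solution Solution_alt
  simp only [pv_total_norm]
  by_cases hm : PySem.Int.mod ((grid.map (fun row => (PySem.List.count row "@" : Int))).sum)
      ((h_ + 1) * (v + 1)) ≠ 0
  · rw [if_pos hm, if_pos hm]
  rw [if_neg hm, if_neg hm]
  by_cases he : PySem.Int.floordiv ((grid.map (fun row => (PySem.List.count row "@" : Int))).sum)
      ((h_ + 1) * (v + 1)) = 0
  · rw [if_pos he, if_pos he]
  rw [if_neg he, if_neg he]
  obtain ⟨hr1, hc1, hh0, hv0, hlen, hrows⟩ := (hcase.resolve_left hm).resolve_left he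
  rw [show r = ((r.toNat : Nat) : Int) from by omega,
      show c = ((c.toNat : Nat) : Int) from by omega,
      show h_ = ((h_.toNat : Nat) : Int) from by omega,
      show v = ((v.toNat : Nat) : Int) from by omega]
  set R := r.toNat with hRdef
  set C := c.toNat with hCdef
  set H := h_.toNat with hHdef
  set V := v.toNat with hVdef
  simp only [Int.toNat_natCast]
  rw [pv_ds_norm grid R C]
  rw [pv_vertA_norm grid R C (by omega) _, pv_horA_norm grid R C (by omega) _,
    pv_vertB_norm grid R C hlen _, pv_horB_norm grid R C hlen hrows _]
  set E := PySem.Int.floordiv ((grid.map (fun row => (PySem.List.count row "@" : Int))).sum)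
    (((H:Int) + 1) * ((V:Int) + 1)) with hEdef
  by_cases hg : PySem.List.len (pvCutsB (pvColS grid R) (E * ((H:Int) + 1)) C) ≠ (V:Int) + 1 ∨
      PySem.List.len (pvCutsB (fun k => pvRowPre grid k C) (E * ((V:Int) + 1)) R) ≠ (H:Int) + 1
  · rw [if_pos hg, if_pos hg]
  · rw [if_neg hg, if_neg hg]
    push_neg at hg
    obtain ⟨hgv, hgh⟩ := hg
    rw [PySem.List.len_eq] at hgv hgh
    have hlenV' : (pvCutsB (pvColS grid R) (E * ((H:Int) + 1)) C).length = V + 1 := by omega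
    have hlenH' : (pvCutsB (fun k => pvRowPre grid k C) (E * ((V:Int) + 1)) R).length = H + 1 := by
      omega
    simp only [pv_counts_getD grid R C hlen hrows]
    rw [pv_final grid R C H V E (by omega) (by omega)
      (pvCutsB (fun k => pvRowPre grid k C) (E * ((V:Int) + 1)) R)
      (pvCutsB (pvColS grid R) (E * ((H:Int) + 1)) C)
      (pv_cuts_sorted _ _ _) (pv_cuts_sorted _ _ _)
      (pv_cuts_mem _ _ _) (pv_cuts_mem _ _ _) hlenH' hlenV']
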